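-- pv_equiv track=rewrite | github.com/ghaith96/advent_of_code_2021 | 03-binary-diagnostic/binary_diagnostic.py | get_index_char_freq
-- ===== SOURCE A (Python) =====
-- def get_index_char_freq(readings):
--     freq = {}
--     for reading in readings:
--         chars = list(reading)
--         for i, char in enumerate(chars):
--             if i in freq:
--                 if char in freq[i]:
--                     freq[i][char] += 1
--                 else:
--                     freq[i][char] = 1
--             else:
--                 freq[i] = {}
--                 freq[i][char] = 1
--     return freq
-- ===== SOURCE B (Python) =====
-- def get_index_char_freq(readings):
--     # column-wise: for each position, scan all readings and count chars
--     if not readings: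
--         return {}
--     maxlen = max(len(r) for r in readings)
--     freq = {}
--     for i in range(maxlen):
--         col = {}
--         for r in readings:
--             if len(r) > i:
--                 c = r[i]
--                 col[c] = col.get(c, 0) + 1
--         freq[i] = col
--     return freq
-- ===== Notes on version B (the rewrite author's own statement) =====
-- stated objective: alternative
-- what changed: B transposes the iteration: it guards the empty case, computes maxlen, and builds each column's counter by an outer loop over positions 0..maxlen-1 with an inner scan of all readings (skipping readings shorter than the position), instead of A's row-by-row loop that lazily creates and updates per-index sub-dicts.
import Mathlib
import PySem

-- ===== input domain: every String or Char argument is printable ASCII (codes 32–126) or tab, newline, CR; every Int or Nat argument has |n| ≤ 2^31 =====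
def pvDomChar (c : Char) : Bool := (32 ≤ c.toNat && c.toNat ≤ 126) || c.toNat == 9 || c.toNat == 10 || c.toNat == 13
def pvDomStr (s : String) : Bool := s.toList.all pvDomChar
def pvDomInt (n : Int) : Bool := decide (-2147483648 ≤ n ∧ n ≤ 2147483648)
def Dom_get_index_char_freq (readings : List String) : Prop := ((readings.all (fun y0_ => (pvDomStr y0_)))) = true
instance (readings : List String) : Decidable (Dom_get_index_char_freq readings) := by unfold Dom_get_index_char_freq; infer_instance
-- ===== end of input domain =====

-- B re-implements A column-wise (position-outer, reading-inner over range(maxlen)) instead of A's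
-- row-wise lazy sub-dict building; objective: alternative decomposition, same result, same cost class.

-- ===== PORT A =====
-- one inner-loop step of A: keys i are Python ints, chars are 1-character strings
def pvStepA (freq : PySem.Dict Int (PySem.Dict String Int)) (p : Int × String) :
    PySem.Dict Int (PySem.Dict String Int) :=
  if freq.contains p.1 then
    -- freq[i]: read under the 'i in freq' guard, so getD with a dummy default is exact
    let inner := freq.getD p.1 PySem.Dict.empty
    if inner.contains p.2 then
      freq.insert p.1 (inner.insert p.2 (inner.getD p.2 0 + 1))
    else
      freq.insert p.1 (inner.insert p.2 1)
  else
    freq.insert p.1 ((PySem.Dict.empty : PySem.Dict String Int).insert p.2 1)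

-- one outer-loop step of A: chars = list(reading) (1-character strings), for i, char in enumerate(chars)
def pvRowA (freq : PySem.Dict Int (PySem.Dict String Int)) (reading : String) :
    PySem.Dict Int (PySem.Dict String Int) :=
  (PySem.List.enumerate (reading.toList.map (fun c => String.ofList [c]))).foldl pvStepA freq

def get_index_char_freq (readings : List String) : List (Int × List (String × Int)) :=
  ((readings.foldl pvRowA PySem.Dict.empty).items).map (fun p => (p.1, p.2.items))

-- ===== PORT B =====
-- B's inner loop for column i: count reading[i] over all readings with len(reading) > i
def pvColB (readings : List String) (i : Int) : PySem.Dict String Int :=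
  readings.foldl (fun col r =>
    if PySem.Str.len r > i then
      match PySem.Str.pyGet? r i with   -- r[i]; guarded by 0 ≤ i < len(r), never none
      | some c => col.insert (String.ofList [c]) (col.getD (String.ofList [c]) 0 + 1)
      | none => col
    else col) PySem.Dict.empty

def get_index_char_freq_alt (readings : List String) : List (Int × List (String × Int)) :=
  if readings = [] then []
  else
    match PySem.List.max? (readings.map PySem.Str.len) (fun x => x) with  -- max(len(r) for r in readings)
    | none => []   -- unreachable: readings ≠ []
    | some maxlen =>
      (((PySem.List.pyRange 0 maxlen 1).foldl
          (fun freq i => freq.insert i (pvColB readings i)) PySem.Dict.empty).items).map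
        (fun p => (p.1, p.2.items))

-- ===== PRECONDITION & SPEC =====
def Spec_get_index_char_freq (readings : List String) (out : List (Int × List (String × Int))) : Prop := out = get_index_char_freq_alt readings
instance (readings : List String) (out : List (Int × List (String × Int))) : Decidable (Spec_get_index_char_freq readings out) := by unfold Spec_get_index_char_freq; infer_instance

-- ===== CLAIM (what is proved, stated in full; the proofs are below) =====
def Claim_equal_get_index_char_freq : Prop := ∀ (readings : List String), Dom_get_index_char_freq readings → Spec_get_index_char_freq readings (get_index_char_freq readings)

-- ===== LEMMAS AND PROOFS =====

-- proof-side vocabulary -------------------------------------------------------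
def pvBump (d : PySem.Dict String Int) (ch : String) : PySem.Dict String Int :=
  d.insert ch (d.getD ch 0 + 1)

-- the column-i counter after processing rs (reference value both ports reach)
def pvColStep (i : Nat) (d : PySem.Dict String Int) (r : String) : PySem.Dict String Int :=
  let chars := r.toList.map (fun c => String.ofList [c])
  if i < chars.length then pvBump d (chars.getD i "") else d

def pvCol (rs : List String) (i : Nat) : PySem.Dict String Int :=
  rs.foldl (pvColStep i) PySem.Dict.empty

def pvMaxLen (rs : List String) : Nat :=
  rs.foldl (fun m r => max m r.toList.length) 0

-- the dict whose keys are 0..m-1 with column values f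
def pvMkd (m : Nat) (f : Nat → PySem.Dict String Int) : PySem.Dict Int (PySem.Dict String Int) :=
  PySem.Dict.mk ((List.range m).map (fun i => (((i : Nat) : Int), f i)))

lemma pv_dict_ext {κ ν : Type} (d₁ d₂ : PySem.Dict κ ν) (h : d₁.items = d₂.items) : d₁ = d₂ := by
  cases d₁; cases d₂; simpa using h

lemma pv_mkd_congr {m : Nat} {f g : Nat → PySem.Dict String Int}
    (h : ∀ i, i < m → f i = g i) : pvMkd m f = pvMkd m g := by
  apply pv_dict_ext; unfold pvMkd
  exact List.map_congr_left (fun i hi => by rw [h i (List.mem_range.mp hi)])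

lemma pv_mkd_contains (m : Nat) (f : Nat → PySem.Dict String Int) (k : Nat) :
    (pvMkd m f).contains ((k : Nat) : Int) = decide (k < m) := by
  rw [PySem.Dict.contains_eq_decide_mem_keys]
  apply decide_eq_decide.mpr
  unfold pvMkd
  simp [PySem.Dict.keys_mk, List.mem_map, List.mem_range]

lemma pv_mkd_nodup (m : Nat) (f : Nat → PySem.Dict String Int) : (pvMkd m f).keys.Nodup := by
  unfold pvMkd
  rw [PySem.Dict.keys_mk]
  rw [List.map_map]
  exact (List.nodup_range (n := m)).map (fun a b hab => by simpa using hab)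

lemma pv_mkd_getD (m : Nat) (f : Nat → PySem.Dict String Int) (k : Nat) (hk : k < m) (d0 : PySem.Dict String Int) :
    (pvMkd m f).getD ((k : Nat) : Int) d0 = f k := by
  apply PySem.Dict.getD_of_mem_items _ _ (pv_mkd_nodup m f)
  unfold pvMkd
  exact List.mem_map.mpr ⟨k, List.mem_range.mpr hk, rfl⟩

lemma pv_mkd_insert_lt (m : Nat) (f : Nat → PySem.Dict String Int) (k : Nat) (hk : k < m)
    (v : PySem.Dict String Int) :
    (pvMkd m f).insert ((k : Nat) : Int) v = pvMkd m (fun i => if i = k then v else f i) := by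
  apply pv_dict_ext
  rw [PySem.Dict.items_insert_of_contains _ _ (by rw [pv_mkd_contains]; simpa using hk)]
  unfold pvMkd
  simp only [List.map_map]
  apply List.map_congr_left
  intro i _
  by_cases h : i = k
  · subst h; simp
  · simp [h]

lemma pv_mkd_insert_eq (m : Nat) (f : Nat → PySem.Dict String Int) (v : PySem.Dict String Int) :
    (pvMkd m f).insert ((m : Nat) : Int) v = pvMkd (m + 1) (fun i => if i = m then v else f i) := by
  apply pv_dict_ext
  rw [PySem.Dict.items_insert_of_not_contains _ _ (by rw [pv_mkd_contains]; simp)]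
  unfold pvMkd
  rw [List.range_succ, List.map_append]
  congr 1
  · apply List.map_congr_left
    intro i hi
    have : i ≠ m := Nat.ne_of_lt (List.mem_range.mp hi)
    simp [this]
  · simp

lemma pv_stepA_eq (freq : PySem.Dict Int (PySem.Dict String Int)) (i : Int) (ch : String) :
    pvStepA freq (i, ch) = freq.insert i (pvBump (freq.getD i PySem.Dict.empty) ch) := by
  unfold pvStepA pvBump
  by_cases hc : freq.contains i
  · simp only [hc, if_true]
    by_cases hch : (freq.getD i PySem.Dict.empty).contains ch
    · simp [hch]
    · simp only [Bool.not_eq_true] at hch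
      simp [hch, PySem.Dict.getD_of_not_contains _ _ hch]
  · simp only [Bool.not_eq_true] at hc
    simp [hc, PySem.Dict.getD_of_not_contains _ _ hc, PySem.Dict.getD_empty]

-- the inner enumerate-loop of A, started at position k on a dict with keys 0..m-1
lemma pv_row_loop (chars : List String) : ∀ (k m : Nat) (f : Nat → PySem.Dict String Int), k ≤ m →
    (PySem.List.enumerate chars ((k : Nat) : Int)).foldl pvStepA (pvMkd m f)
    = pvMkd (max m (k + chars.length)) (fun i =>
        if k ≤ i ∧ i - k < chars.length
        then pvBump (if i < m then f i else PySem.Dict.empty) (chars.getD (i - k) "")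
        else f i) := by
  induction chars with
  | nil =>
    intro k m f hk
    rw [PySem.List.enumerate_nil, List.foldl_nil]
    rw [show max m (k + List.length ([] : List String)) = m by simp; omega]
    exact pv_mkd_congr (fun i _ => by simp)
  | cons c cs ih =>
    intro k m f hk
    rw [PySem.List.enumerate_cons, List.foldl_cons, pv_stepA_eq]
    by_cases hkm : k < m
    · rw [pv_mkd_getD m f k hkm, pv_mkd_insert_lt m f k hkm]
      rw [show ((k : Nat) : Int) + 1 = (((k + 1 : Nat)) : Int) by push_cast; ring]
      rw [ih (k + 1) m _ hkm]
      rw [show max m ((k + 1) + cs.length) = max m (k + (c :: cs).length) by simp; omega]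
      apply pv_mkd_congr
      intro i hi
      by_cases hik : i = k
      · subst hik
        have h1 : ¬ (i + 1 ≤ i ∧ i - (i + 1) < cs.length) := by omega
        have h2 : i ≤ i ∧ i - i < (c :: cs).length := by simp
        simp only [if_pos h2, if_neg h1, if_pos hkm]
        simp
      · have harg : (if i < m then (if i = k then pvBump (f k) c else f i) else PySem.Dict.empty)
            = (if i < m then f i else PySem.Dict.empty) := by
          by_cases him : i < m <;> simp [him, hik]
        by_cases hcond : k ≤ i ∧ i - k < (c :: cs).length
        · have hk1 : k + 1 ≤ i := by omega
          have hcond' : k + 1 ≤ i ∧ i - (k + 1) < cs.length := by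
            constructor; · omega
            · have := hcond.2; simp at this ⊢; omega
          rw [if_pos hcond', if_pos hcond, harg]
          congr 1
          have : i - k = (i - (k + 1)) + 1 := by omega
          rw [this, List.getD_cons_succ]
        · have hcond' : ¬ (k + 1 ≤ i ∧ i - (k + 1) < cs.length) := by
            intro hc2; apply hcond; constructor; · omega
            · simp; omega
          rw [if_neg hcond', if_neg hcond]
          simp [hik]
    · have hke : m = k := by omega
      subst hke
      rw [PySem.Dict.getD_of_not_contains _ _ (by rw [pv_mkd_contains]; simp)]
      rw [pv_mkd_insert_eq m f]
      rw [show ((m : Nat) : Int) + 1 = (((m + 1 : Nat)) : Int) by push_cast; ring]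
      rw [ih (m + 1) (m + 1) _ (le_refl _)]
      rw [show max (m + 1) ((m + 1) + cs.length) = max m (m + (c :: cs).length) by simp; omega]
      apply pv_mkd_congr
      intro i hi
      by_cases hik : i = m
      · subst hik
        have h1 : ¬ (i + 1 ≤ i ∧ i - (i + 1) < cs.length) := by omega
        have h2 : i ≤ i ∧ i - i < (c :: cs).length := by simp
        simp only [if_pos h2, if_neg h1]
        simp
      · have harg : (if i < m + 1 then (if i = m then pvBump PySem.Dict.empty c else f i) else PySem.Dict.empty)
            = (if i < m then f i else PySem.Dict.empty) := by
          by_cases him : i < m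
          · simp [him, hik, Nat.lt_succ_of_lt him]
          · have : ¬ i < m + 1 := by omega
            simp [him, this]
        by_cases hcond : m ≤ i ∧ i - m < (c :: cs).length
        · have hcond' : m + 1 ≤ i ∧ i - (m + 1) < cs.length := by
            constructor; · omega
            · have := hcond.2; simp at this ⊢; omega
          rw [if_pos hcond', if_pos hcond, harg]
          congr 1
          have : i - m = (i - (m + 1)) + 1 := by omega
          rw [this, List.getD_cons_succ]
        · have hcond' : ¬ (m + 1 ≤ i ∧ i - (m + 1) < cs.length) := by
            intro hc2; apply hcond; constructor; · omega
            · simp; omega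
          rw [if_neg hcond', if_neg hcond]
          simp [hik]

lemma pv_maxLen_append (rs : List String) (r : String) :
    pvMaxLen (rs ++ [r]) = max (pvMaxLen rs) r.toList.length := by
  unfold pvMaxLen; rw [List.foldl_append]; rfl

lemma pv_col_append (rs : List String) (r : String) (i : Nat) :
    pvCol (rs ++ [r]) i = pvColStep i (pvCol rs i) r := by
  unfold pvCol; rw [List.foldl_append]; rfl

lemma pv_maxLen_bound (rs : List String) : ∀ r ∈ rs, r.toList.length ≤ pvMaxLen rs := by
  intro r hr
  unfold pvMaxLen
  rw [← List.foldl_map (f := fun r : String => r.toList.length) (g := max)]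
  exact (PySem.List.le_foldl_max _ _).2 _ (List.mem_map.mpr ⟨r, hr, rfl⟩)

lemma pv_col_empty (rs : List String) (i : Nat) (h : pvMaxLen rs ≤ i) : pvCol rs i = PySem.Dict.empty := by
  have hall : ∀ r ∈ rs, ¬ i < r.toList.length := by
    intro r hr
    have := pv_maxLen_bound rs r hr
    omega
  unfold pvCol
  clear h
  induction rs with
  | nil => rfl
  | cons x t ih =>
    rw [List.foldl_cons, show pvColStep i PySem.Dict.empty x = PySem.Dict.empty by
      unfold pvColStep
      rw [if_neg (by simpa using hall x (List.mem_cons_self))]]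
    exact ih (fun r hr => hall r (List.mem_cons_of_mem _ hr))

lemma pv_foldA (rs : List String) :
    rs.foldl pvRowA PySem.Dict.empty = pvMkd (pvMaxLen rs) (pvCol rs) := by
  induction rs using List.reverseRecOn with
  | nil => rfl
  | append_singleton rs r ih =>
    rw [List.foldl_append, List.foldl_cons, List.foldl_nil, ih]
    unfold pvRowA
    rw [show (0 : Int) = ((0 : Nat) : Int) by simp]
    rw [pv_row_loop _ 0 (pvMaxLen rs) (pvCol rs) (Nat.zero_le _)]
    rw [show max (pvMaxLen rs) (0 + (r.toList.map (fun c => String.ofList [c])).length)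
        = pvMaxLen (rs ++ [r]) by rw [pv_maxLen_append]; simp]
    apply pv_mkd_congr
    intro i hi
    rw [pv_col_append]
    unfold pvColStep
    simp only [Nat.zero_le, true_and, Nat.sub_zero]
    by_cases hlen : i < (r.toList.map (fun c => String.ofList [c])).length
    · rw [if_pos hlen, if_pos hlen]
      by_cases him : i < pvMaxLen rs
      · rw [if_pos him]
      · rw [if_neg him, pv_col_empty rs i (by omega)]
    · rw [if_neg hlen, if_neg hlen]

lemma pv_colB_eq (rs : List String) (i : Nat) : pvColB rs ((i : Nat) : Int) = pvCol rs i := by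
  unfold pvColB pvCol
  congr 1
  funext col r
  unfold pvColStep pvBump
  by_cases h : i < r.toList.length
  · have hgt : PySem.Str.len r > ((i : Nat) : Int) := by
      unfold PySem.Str.len; exact_mod_cast h
    have hget : PySem.Str.pyGet? r ((i : Nat) : Int) = some (r.toList.get ⟨i, h⟩) := by
      unfold PySem.Str.pyGet? PySem.Chars.pyGet?
      have h' : i < r.length := by simpa using h
      simp [PySem.List.pyGet?, PySem.List.pyIdx?, h']
    rw [if_pos hgt, hget]
    have hlen : i < (r.toList.map (fun c => String.ofList [c])).length := by simpa using h
    rw [if_pos hlen]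
    rw [List.getD_eq_getElem?_getD, List.getElem?_map, List.getElem?_eq_getElem h]
    simp
  · have hgt : ¬ PySem.Str.len r > ((i : Nat) : Int) := by
      unfold PySem.Str.len; simp; exact_mod_cast Nat.not_lt.mp h
    have hlen : ¬ i < (r.toList.map (fun c => String.ofList [c])).length := by simpa using h
    rw [if_neg hgt, if_neg hlen]

lemma pv_max_cast (t : List String) : ∀ (a : Nat),
    (t.map PySem.Str.len).foldl max ((a : Nat) : Int)
      = ((t.foldl (fun m r => max m r.toList.length) a : Nat) : Int) := by
  induction t with
  | nil => intro a; simp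
  | cons x s ih =>
    intro a
    rw [List.map_cons, List.foldl_cons, List.foldl_cons]
    rw [show max ((a : Nat) : Int) (PySem.Str.len x) = (((max a x.toList.length : Nat)) : Int) by
      unfold PySem.Str.len; push_cast; rfl]
    exact ih _

lemma pv_range_fold (rs : List String) (n : Nat) : ∀ (a : Nat),
    (PySem.List.pyRange ((a : Nat) : Int) (((a + n : Nat)) : Int) 1).foldl
        (fun freq i => freq.insert i (pvColB rs i)) (pvMkd a (pvCol rs))
      = pvMkd (a + n) (pvCol rs) := by
  induction n with
  | zero => intro a; rw [PySem.List.pyRange_one_eq_nil (by simp)]; rfl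
  | succ n ih =>
    intro a
    rw [PySem.List.pyRange_one_cons (by push_cast; omega), List.foldl_cons]
    rw [pv_colB_eq rs a]
    rw [show (pvMkd a (pvCol rs)).insert ((a : Nat) : Int) (pvCol rs a)
        = pvMkd (a + 1) (pvCol rs) by
      rw [pv_mkd_insert_eq a (pvCol rs) (pvCol rs a)]
      apply pv_mkd_congr
      intro i _
      by_cases h : i = a <;> simp [h]]
    rw [show ((a : Nat) : Int) + 1 = (((a + 1 : Nat)) : Int) by push_cast; ring]
    rw [show (((a + (n + 1) : Nat)) : Int) = ((((a + 1) + n : Nat)) : Int) by push_cast; ring]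
    rw [ih (a + 1)]
    rw [show (a + 1) + n = a + (n + 1) by omega]

lemma pv_alt_cons (r0 : String) (rest : List String) :
    get_index_char_freq_alt (r0 :: rest)
      = ((( PySem.List.pyRange ((0 : Nat) : Int) (((0 + pvMaxLen (r0 :: rest) : Nat)) : Int) 1).foldl
            (fun freq i => freq.insert i (pvColB (r0 :: rest) i)) PySem.Dict.empty).items).map
          (fun p => (p.1, p.2.items)) := by
  unfold get_index_char_freq_alt
  rw [if_neg (by simp), List.map_cons, PySem.List.max?_id_cons]
  rw [show (List.map PySem.Str.len rest).foldl max (PySem.Str.len r0)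
      = (((0 + pvMaxLen (r0 :: rest) : Nat)) : Int) by
    rw [show PySem.Str.len r0 = ((r0.toList.length : Nat) : Int) from rfl]
    rw [pv_max_cast rest r0.toList.length]
    congr 1
    simp [pvMaxLen, List.foldl_cons]]
  rfl

-- ===== VERDICT (by name: the statement is the Claim_ definition above) =====
theorem get_index_char_freq_spec : Claim_equal_get_index_char_freq := by
  intro readings _
  unfold Spec_get_index_char_freq get_index_char_freq
  rw [pv_foldA]
  cases readings with
  | nil => rfl
  | cons r0 rest =>
    rw [pv_alt_cons,
      show (PySem.Dict.empty : PySem.Dict Int (PySem.Dict String Int))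
        = pvMkd 0 (pvCol (r0 :: rest)) from rfl,
      pv_range_fold (r0 :: rest) (pvMaxLen (r0 :: rest)) 0, Nat.zero_add]
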